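-- pv_equiv track=rewrite | github.com/Famaral97/clubgrid | src/usecases/generate_grid.py | _grid_is_completable
-- ===== SOURCE A (Python) =====
-- def _grid_is_completable(grid):
--     def backtrack(used, row, col):
--         if row == 3:
--             return True
--
--         next_row, next_col = (row, col + 1) if col < 2 else (row + 1, 0)
--
--         for club in grid[row][col]:
--             if club not in used:
--                 used.add(club)
--                 if backtrack(used, next_row, next_col):
--                     return True
--                 used.remove(club)
--
--         return False
--
--     return backtrack(set(), 0, 0)
-- ===== SOURCE B (Python) =====
-- def _grid_is_completable(grid):
--     cells = [grid[r][c] for r in range(3) for c in range(3)]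
--
--     def hall(i, count, union):
--         if i == 9:
--             return len(union) >= count
--         return hall(i + 1, count, union) and hall(i + 1, count + 1, union | set(cells[i]))
--
--     return hall(0, 0, set())
-- ===== Notes on version B (the rewrite author's own statement) =====
-- stated objective: alternative
-- what changed: A searches for a system of distinct representatives by backtracking over club choices (worst-case exponential in the club lists); B instead checks Hall's condition, recursively enumerating all 512 subsets of the 9 cells and comparing each subset's size with the size of the union of its club sets.
-- outside the precondition, e.g. on _grid_is_completable([[[]]]): A returns False, B raises IndexError; on _grid_is_completable([[[], [1], [1]]]): A returns False, B raises IndexError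
import Mathlib
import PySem

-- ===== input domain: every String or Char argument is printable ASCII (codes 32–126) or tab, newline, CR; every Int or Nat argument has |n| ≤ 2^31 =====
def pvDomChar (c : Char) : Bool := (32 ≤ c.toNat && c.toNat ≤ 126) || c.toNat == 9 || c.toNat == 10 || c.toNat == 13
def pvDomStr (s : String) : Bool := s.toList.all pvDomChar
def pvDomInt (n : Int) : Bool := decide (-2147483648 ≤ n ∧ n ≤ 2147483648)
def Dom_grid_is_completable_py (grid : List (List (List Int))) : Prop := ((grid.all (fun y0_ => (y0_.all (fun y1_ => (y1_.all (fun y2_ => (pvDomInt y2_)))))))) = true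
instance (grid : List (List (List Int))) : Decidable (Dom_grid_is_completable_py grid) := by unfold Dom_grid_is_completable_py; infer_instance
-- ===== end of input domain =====

-- ===== PORT A =====
-- grid[row][col]; the `.getD []` defaults are reached only outside Pre_ (Python raises IndexError there)
def pvCellA (grid : List (List (List Int))) (row col : Nat) : List Int :=
  (PySem.List.pyGet? ((PySem.List.pyGet? grid (row : Int)).getD []) (col : Int)).getD []

-- backtrack(used, row, col); fuel 10 covers the 10 positions (0,0) … (3,0); the Python for-loop
-- restores `used` after each failed branch, so it is List.any over the cell with used.add club
def pvBacktrack (grid : List (List (List Int))) : Nat → PySem.Set Int → Nat → Nat → Bool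
  | 0, _, _, _ => false
  | fuel+1, used, row, col =>
    if row = 3 then true
    else
      let nextRow := if col < 2 then row else row + 1
      let nextCol := if col < 2 then col + 1 else 0
      (pvCellA grid row col).any fun club =>
        !(PySem.Set.contains used club) && pvBacktrack grid fuel (PySem.Set.add used club) nextRow nextCol

def grid_is_completable_py (grid : List (List (List Int))) : Bool :=
  pvBacktrack grid 10 PySem.Set.empty 0 0

-- ===== PORT B =====
-- cells = [grid[r][c] for r in range(3) for c in range(3)]
def pvCellsB (grid : List (List (List Int))) : List (List Int) :=
  (PySem.List.pyRange 0 3 1).flatMap fun r =>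
    (PySem.List.pyRange 0 3 1).map fun c =>
      (PySem.List.pyGet? ((PySem.List.pyGet? grid r).getD []) c).getD []

-- hall(i, count, union), recursing over the remaining cells cells[i:]
def pvHall : List (List Int) → Nat → PySem.Set Int → Bool
  | [], count, union => decide ((count : Int) ≤ PySem.Set.len union)
  | cell :: rest, count, union =>
    pvHall rest count union && pvHall rest (count + 1) (PySem.Set.union union (PySem.Set.ofList cell))

def grid_is_completable_py_alt (grid : List (List (List Int))) : Bool :=
  pvHall (pvCellsB grid) 0 PySem.Set.empty

-- ===== PRECONDITION & SPEC =====
-- Pre_ excludes grids smaller than 3×3: there Python A either raises IndexError, or returns False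
-- only because its search hits a dead end before reaching a missing cell, while B (which reads all
-- nine cells up front) raises IndexError.
def Pre_grid_is_completable_py (grid : List (List (List Int))) : Prop :=
  3 ≤ grid.length ∧ ∀ row ∈ grid.take 3, 3 ≤ row.length

instance (grid : List (List (List Int))) : Decidable (Pre_grid_is_completable_py grid) := by
  unfold Pre_grid_is_completable_py; infer_instance

def pvWitness_grid_is_completable_py : List (List (List Int)) :=
  [[[1], [2], [3]], [[4], [5], [6]], [[7], [8], [9]]]

def Spec_grid_is_completable_py (grid : List (List (List Int))) (out : Bool) : Prop :=
  out = grid_is_completable_py_alt grid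
instance (grid : List (List (List Int))) (out : Bool) : Decidable (Spec_grid_is_completable_py grid out) := by
  unfold Spec_grid_is_completable_py; infer_instance

-- ===== CLAIM (what is proved, stated in full; the proofs are below) =====
def Claim_equal_grid_is_completable_py : Prop :=
  ∀ (grid : List (List (List Int))), Dom_grid_is_completable_py grid →
    Pre_grid_is_completable_py grid →
    Spec_grid_is_completable_py grid (grid_is_completable_py grid)

-- ===== LEMMAS AND PROOFS =====

-- generic SDR backtracking over a list of cells (what pvBacktrack does along positions 0..8)
def pvSearch : List (List Int) → PySem.Set Int → Bool
  | [], _ => true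
  | cell :: rest, used =>
    cell.any fun x => !(PySem.Set.contains used x) && pvSearch rest (PySem.Set.add used x)

-- union of the club sets of a list of cells, as a Finset
def pvFinsetUnion : List (List Int) → Finset Int
  | [] => ∅
  | cell :: rest => cell.toFinset ∪ pvFinsetUnion rest

theorem mem_pvFinsetUnion (sub : List (List Int)) (x : Int) :
    x ∈ pvFinsetUnion sub ↔ ∃ c ∈ sub, x ∈ c := by
  induction sub with
  | nil => simp [pvFinsetUnion]
  | cons c rest ih => simp [pvFinsetUnion, ih]

-- characterisation of the backtracking search: success ↔ a system of distinct
-- representatives avoiding `used` exists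
theorem pvSearch_iff (cells : List (List Int)) : ∀ (used : PySem.Set Int),
    pvSearch cells used = true ↔
      ∃ l : List Int, l.Nodup ∧ (∀ x ∈ l, x ∉ used) ∧ List.Forall₂ (· ∈ ·) l cells := by
  induction cells with
  | nil =>
    intro used
    simp only [pvSearch, true_iff]
    exact ⟨[], by simp⟩
  | cons cell rest ih =>
    intro used
    rw [pvSearch.eq_2, List.any_eq_true]
    constructor
    · rintro ⟨x, hx, hb⟩
      rw [Bool.and_eq_true, Bool.not_eq_true'] at hb
      obtain ⟨hnc, hs⟩ := hb
      replace hnc : x ∉ used := by simpa [PySem.Set.contains] using hnc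
      obtain ⟨l, hnd, havoid, hf⟩ := (ih _).mp hs
      refine ⟨x :: l, ?_, ?_, List.Forall₂.cons hx hf⟩
      · exact List.nodup_cons.mpr
          ⟨fun hmem => (havoid x hmem) ((PySem.Set.mem_add used x x).mpr (Or.inr rfl)), hnd⟩
      · intro y hy
        rcases List.mem_cons.mp hy with h | h
        · exact h ▸ hnc
        · exact fun hyu => havoid y h ((PySem.Set.mem_add used x y).mpr (Or.inl hyu))
    · rintro ⟨l', hnd, havoid, hf2⟩
      rcases List.forall₂_cons_right_iff.mp hf2 with ⟨x, l, hx, hf, rfl⟩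
      have hxused : x ∉ used := havoid x List.mem_cons_self
      have hxl : x ∉ l := (List.nodup_cons.mp hnd).1
      refine ⟨x, hx, ?_⟩
      rw [Bool.and_eq_true, Bool.not_eq_true']
      refine ⟨by simpa [PySem.Set.contains] using hxused,
        (ih _).mpr ⟨l, (List.nodup_cons.mp hnd).2, ?_, hf⟩⟩
      intro y hy hyadd
      rcases (PySem.Set.mem_add used x y).mp hyadd with h | h
      · exact havoid y (List.mem_cons_of_mem x hy) h
      · exact hxl (h ▸ hy)

-- characterisation of the Hall check: it verifies Hall's condition over all sublists
theorem pvHall_iff (cells : List (List Int)) : ∀ (count : Nat) (union : PySem.Set Int),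
    union.Nodup →
    (pvHall cells count union = true ↔
      ∀ sub, sub.Sublist cells →
        count + sub.length ≤ (union.toFinset ∪ pvFinsetUnion sub).card) := by
  induction cells with
  | nil =>
    intro count union hnd
    simp only [pvHall, decide_eq_true_eq, PySem.Set.len]
    constructor
    · intro hlen sub hsub
      rw [List.sublist_nil.mp hsub]
      simp only [pvFinsetUnion, Finset.union_empty, List.length_nil, Nat.add_zero,
        List.toFinset_card_of_nodup hnd]
      exact_mod_cast hlen
    · intro h
      have h0 := h [] (List.Sublist.refl _)
      simp only [pvFinsetUnion, Finset.union_empty, List.length_nil, Nat.add_zero,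
        List.toFinset_card_of_nodup hnd] at h0
      exact_mod_cast h0
  | cons cell rest ih =>
    intro count union hnd
    have hndu : (PySem.Set.union union (PySem.Set.ofList cell)).Nodup :=
      PySem.Set.nodup_union union _ hnd
    have hset : (PySem.Set.union union (PySem.Set.ofList cell)).toFinset
        = union.toFinset ∪ cell.toFinset := by
      ext x
      simp [PySem.Set.mem_union, PySem.Set.mem_ofList]
    have hU : ∀ r, union.toFinset ∪ cell.toFinset ∪ pvFinsetUnion r
        = union.toFinset ∪ pvFinsetUnion (cell :: r) := by
      intro r
      simp [pvFinsetUnion, Finset.union_assoc]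
    simp only [pvHall, Bool.and_eq_true, ih count union hnd, ih (count + 1) _ hndu]
    constructor
    · rintro ⟨h1, h2⟩ sub hsub
      rcases List.sublist_cons_iff.mp hsub with h | ⟨r, rfl, hr⟩
      · exact h1 sub h
      · have := h2 r hr
        rw [hset, hU r] at this
        simpa [List.length_cons, Nat.add_comm, Nat.add_left_comm, Nat.add_assoc] using this
    · intro h
      refine ⟨fun sub hsub => h sub (hsub.cons cell), fun r hr => ?_⟩
      have := h (cell :: r) (hr.cons₂ cell)
      rw [hset, hU r]
      simpa [List.length_cons, Nat.add_comm, Nat.add_left_comm, Nat.add_assoc] using this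

-- the cell Finsets, indexed by position
def pvT (cells : List (List Int)) (i : Fin cells.length) : Finset Int := (cells.get i).toFinset

-- an SDR (as a list) is the same thing as an injective choice function
theorem sdr_iff_injective (cells : List (List Int)) :
    (∃ l : List Int, l.Nodup ∧ List.Forall₂ (· ∈ ·) l cells) ↔
      ∃ f : Fin cells.length → Int, Function.Injective f ∧ ∀ i, f i ∈ pvT cells i := by
  constructor
  · rintro ⟨l, hnd, hf⟩
    have hlen : l.length = cells.length := List.Forall₂.length_eq hf
    refine ⟨fun i => l.get (Fin.cast hlen.symm i), ?_, ?_⟩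
    · exact (List.nodup_iff_injective_get.mp hnd).comp (Fin.cast_injective _)
    · intro i
      have := (List.forall₂_iff_get.mp hf).2 i (by omega) i.isLt
      simpa [pvT, List.mem_toFinset] using this
  · rintro ⟨f, hinj, hmem⟩
    refine ⟨List.ofFn f, List.nodup_ofFn.mpr hinj, ?_⟩
    rw [List.forall₂_iff_get]
    refine ⟨by simp, fun i h1 h2 => ?_⟩
    have := hmem ⟨i, h2⟩
    simpa [pvT, List.get_ofFn, List.mem_toFinset] using this

-- Hall's condition over index subsets vs over sublists: sublist → index set
theorem sublist_exists_finset (cells sub : List (List Int)) (h : sub.Sublist cells) :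
    ∃ s : Finset (Fin cells.length), s.card = sub.length ∧
      s.biUnion (pvT cells) = pvFinsetUnion sub := by
  induction h with
  | slnil =>
    refine ⟨∅, rfl, ?_⟩
    ext x
    simp [pvFinsetUnion]
  | @cons l₁ l₂ a _ ih =>
    obtain ⟨s, hcard, hbi⟩ := ih
    refine ⟨s.map (Fin.succEmb l₂.length), by simp [hcard], ?_⟩
    ext x
    simp only [Finset.mem_biUnion, Finset.mem_map]
    rw [← hbi]
    simp only [Finset.mem_biUnion]
    constructor
    · rintro ⟨i, ⟨j, hj, rfl⟩, hx⟩
      exact ⟨j, hj, hx⟩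
    · rintro ⟨j, hj, hx⟩
      exact ⟨_, ⟨j, hj, rfl⟩, hx⟩
  | @cons₂ l₁ l₂ a _ ih =>
    obtain ⟨s, hcard, hbi⟩ := ih
    refine ⟨insert 0 (s.map (Fin.succEmb l₂.length)), ?_, ?_⟩
    · rw [Finset.card_insert_of_notMem (by simp only [Finset.mem_map]; rintro ⟨j, _, hj⟩; exact Fin.succ_ne_zero j hj), Finset.card_map, hcard]
      simp
    · ext x
      simp only [Finset.mem_biUnion, Finset.mem_insert, Finset.mem_map, pvFinsetUnion,
        Finset.mem_union]
      rw [← hbi]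
      simp only [Finset.mem_biUnion]
      constructor
      · rintro ⟨i, hi | ⟨j, hj, rfl⟩, hx⟩
        · subst hi
          exact Or.inl hx
        · exact Or.inr ⟨j, hj, hx⟩
      · rintro (hx | ⟨j, hj, hx⟩)
        · exact ⟨0, Or.inl rfl, hx⟩
        · exact ⟨_, Or.inr ⟨j, hj, rfl⟩, hx⟩

-- index set → sublist
theorem finset_exists_sublist (cells : List (List Int)) (s : Finset (Fin cells.length)) :
    ∃ sub : List (List Int), sub.Sublist cells ∧ sub.length = s.card ∧
      pvFinsetUnion sub = s.biUnion (pvT cells) := by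
  refine ⟨((List.finRange cells.length).filter (fun i => decide (i ∈ s))).map cells.get, ?_, ?_, ?_⟩
  · have h1 : ((List.finRange cells.length).filter (fun i => decide (i ∈ s))).Sublist
        (List.finRange cells.length) := List.filter_sublist
    have h2 := h1.map cells.get
    rwa [List.map_get_finRange] at h2
  · rw [List.length_map]
    have hnd : ((List.finRange cells.length).filter (fun i => decide (i ∈ s))).Nodup :=
      (List.nodup_finRange _).filter _
    rw [← List.toFinset_card_of_nodup hnd]
    congr 1
    ext i
    simp
  · ext x
    simp only [mem_pvFinsetUnion, Finset.mem_biUnion, List.mem_map, List.mem_filter,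
      List.mem_finRange, true_and]
    constructor
    · rintro ⟨c, ⟨i, hi, rfl⟩, hx⟩
      exact ⟨i, of_decide_eq_true hi, by simpa [pvT, List.mem_toFinset] using hx⟩
    · rintro ⟨i, hi, hx⟩
      exact ⟨cells.get i, ⟨i, decide_eq_true hi, rfl⟩, by simpa [pvT, List.mem_toFinset] using hx⟩

-- the two generic programs agree: SDR search = Hall check (via Mathlib's Hall theorem)
theorem search_eq_hall (cells : List (List Int)) :
    pvSearch cells PySem.Set.empty = pvHall cells 0 PySem.Set.empty := by
  rw [Bool.eq_iff_iff, pvSearch_iff, pvHall_iff cells 0 PySem.Set.empty List.nodup_nil]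
  have hempty : (PySem.Set.empty : PySem.Set Int).toFinset = ∅ := rfl
  constructor
  · rintro ⟨l, hnd, _, hf⟩ sub hsub
    have hhall := (Finset.all_card_le_biUnion_card_iff_exists_injective (pvT cells)).mpr
      ((sdr_iff_injective cells).mp ⟨l, hnd, hf⟩)
    obtain ⟨s, hcard, hbi⟩ := sublist_exists_finset cells sub hsub
    have hs := hhall s
    rw [hcard, hbi] at hs
    simpa [hempty] using hs
  · intro h
    have hhall : ∀ s : Finset (Fin cells.length), s.card ≤ (s.biUnion (pvT cells)).card := by
      intro s
      obtain ⟨sub, hsub, hlen, hUs⟩ := finset_exists_sublist cells s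
      have hs := h sub hsub
      rw [hlen, hUs] at hs
      simpa [hempty] using hs
    obtain ⟨l, hnd, hf⟩ := (sdr_iff_injective cells).mpr
      ((Finset.all_card_le_biUnion_card_iff_exists_injective (pvT cells)).mp hhall)
    exact ⟨l, hnd, by simp, hf⟩

-- pvBacktrack walks the nine positions: it equals the generic search over the nine cells
theorem pvBacktrack_bridge (g00 g01 g02 g10 g11 g12 g20 g21 g22 : List Int)
    (t0 t1 t2 : List (List Int)) (gt : List (List (List Int))) :
    ∀ (j row col : Nat), col < 3 → row * 3 + col + j = 9 →
    ∀ u, pvBacktrack ((g00::g01::g02::t0)::(g10::g11::g12::t1)::(g20::g21::g22::t2)::gt) (j + 1) u row col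
      = pvSearch (List.drop (row * 3 + col) [g00, g01, g02, g10, g11, g12, g20, g21, g22]) u := by
  intro j
  induction j with
  | zero =>
    intro row col hc h u
    obtain ⟨rfl, rfl⟩ : row = 3 ∧ col = 0 := by omega
    rw [show List.drop (3 * 3 + 0) [g00, g01, g02, g10, g11, g12, g20, g21, g22] = [] from rfl]
    simp [pvBacktrack, pvSearch]
  | succ j ih =>
    intro row col hc h u
    have hrow : row ≤ 2 := by omega
    have hcol : col ≤ 2 := by omega
    interval_cases row <;> interval_cases col
    · -- position (0,0)
      have hj : j = 8 := by omega
      subst hj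
      have hcell : pvCellA ((g00::g01::g02::t0)::(g10::g11::g12::t1)::(g20::g21::g22::t2)::gt) 0 0 = g00 := by
        unfold pvCellA
        rw [PySem.List.pyGet?_of_nonneg _ (Int.natCast_nonneg _),
          PySem.List.pyGet?_of_nonneg _ (Int.natCast_nonneg _)]
        rfl
      have ihx : ∀ v, pvBacktrack ((g00::g01::g02::t0)::(g10::g11::g12::t1)::(g20::g21::g22::t2)::gt) (8 + 1) v (0) (0 + 1) = pvSearch [g01, g02, g10, g11, g12, g20, g21, g22] v := by
        intro v
        have h2 := ih 0 1 (by norm_num) (by norm_num) v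
        rwa [show List.drop (0 * 3 + 1) [g00, g01, g02, g10, g11, g12, g20, g21, g22] = [g01, g02, g10, g11, g12, g20, g21, g22] from rfl] at h2
      rw [show List.drop (0 * 3 + 0) [g00, g01, g02, g10, g11, g12, g20, g21, g22] = [g00, g01, g02, g10, g11, g12, g20, g21, g22] from rfl]
      rw [pvBacktrack.eq_2]
      simp only [show ((0:Nat) = 3) = False by simp, if_false, show ((0:Nat) < 2) = True by simp, if_true]
      rw [hcell, pvSearch.eq_2]
      simp only [ihx]
    · -- position (0,1)
      have hj : j = 7 := by omega
      subst hj
      have hcell : pvCellA ((g00::g01::g02::t0)::(g10::g11::g12::t1)::(g20::g21::g22::t2)::gt) 0 1 = g01 := by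
        unfold pvCellA
        rw [PySem.List.pyGet?_of_nonneg _ (Int.natCast_nonneg _),
          PySem.List.pyGet?_of_nonneg _ (Int.natCast_nonneg _)]
        rfl
      have ihx : ∀ v, pvBacktrack ((g00::g01::g02::t0)::(g10::g11::g12::t1)::(g20::g21::g22::t2)::gt) (7 + 1) v (0) (1 + 1) = pvSearch [g02, g10, g11, g12, g20, g21, g22] v := by
        intro v
        have h2 := ih 0 2 (by norm_num) (by norm_num) v
        rwa [show List.drop (0 * 3 + 2) [g00, g01, g02, g10, g11, g12, g20, g21, g22] = [g02, g10, g11, g12, g20, g21, g22] from rfl] at h2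
      rw [show List.drop (0 * 3 + 1) [g00, g01, g02, g10, g11, g12, g20, g21, g22] = [g01, g02, g10, g11, g12, g20, g21, g22] from rfl]
      rw [pvBacktrack.eq_2]
      simp only [show ((0:Nat) = 3) = False by simp, if_false, show ((1:Nat) < 2) = True by simp, if_true]
      rw [hcell, pvSearch.eq_2]
      simp only [ihx]
    · -- position (0,2)
      have hj : j = 6 := by omega
      subst hj
      have hcell : pvCellA ((g00::g01::g02::t0)::(g10::g11::g12::t1)::(g20::g21::g22::t2)::gt) 0 2 = g02 := by
        unfold pvCellA
        rw [PySem.List.pyGet?_of_nonneg _ (Int.natCast_nonneg _),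
          PySem.List.pyGet?_of_nonneg _ (Int.natCast_nonneg _)]
        rfl
      have ihx : ∀ v, pvBacktrack ((g00::g01::g02::t0)::(g10::g11::g12::t1)::(g20::g21::g22::t2)::gt) (6 + 1) v (0 + 1) (0) = pvSearch [g10, g11, g12, g20, g21, g22] v := by
        intro v
        have h2 := ih 1 0 (by norm_num) (by norm_num) v
        rwa [show List.drop (1 * 3 + 0) [g00, g01, g02, g10, g11, g12, g20, g21, g22] = [g10, g11, g12, g20, g21, g22] from rfl] at h2
      rw [show List.drop (0 * 3 + 2) [g00, g01, g02, g10, g11, g12, g20, g21, g22] = [g02, g10, g11, g12, g20, g21, g22] from rfl]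
      rw [pvBacktrack.eq_2]
      simp only [show ((0:Nat) = 3) = False by simp, if_false, show ((2:Nat) < 2) = False by simp, if_false]
      rw [hcell, pvSearch.eq_2]
      simp only [ihx]
    · -- position (1,0)
      have hj : j = 5 := by omega
      subst hj
      have hcell : pvCellA ((g00::g01::g02::t0)::(g10::g11::g12::t1)::(g20::g21::g22::t2)::gt) 1 0 = g10 := by
        unfold pvCellA
        rw [PySem.List.pyGet?_of_nonneg _ (Int.natCast_nonneg _),
          PySem.List.pyGet?_of_nonneg _ (Int.natCast_nonneg _)]
        rfl
      have ihx : ∀ v, pvBacktrack ((g00::g01::g02::t0)::(g10::g11::g12::t1)::(g20::g21::g22::t2)::gt) (5 + 1) v (1) (0 + 1) = pvSearch [g11, g12, g20, g21, g22] v := by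
        intro v
        have h2 := ih 1 1 (by norm_num) (by norm_num) v
        rwa [show List.drop (1 * 3 + 1) [g00, g01, g02, g10, g11, g12, g20, g21, g22] = [g11, g12, g20, g21, g22] from rfl] at h2
      rw [show List.drop (1 * 3 + 0) [g00, g01, g02, g10, g11, g12, g20, g21, g22] = [g10, g11, g12, g20, g21, g22] from rfl]
      rw [pvBacktrack.eq_2]
      simp only [show ((1:Nat) = 3) = False by simp, if_false, show ((0:Nat) < 2) = True by simp, if_true]
      rw [hcell, pvSearch.eq_2]
      simp only [ihx]
    · -- position (1,1)
      have hj : j = 4 := by omega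
      subst hj
      have hcell : pvCellA ((g00::g01::g02::t0)::(g10::g11::g12::t1)::(g20::g21::g22::t2)::gt) 1 1 = g11 := by
        unfold pvCellA
        rw [PySem.List.pyGet?_of_nonneg _ (Int.natCast_nonneg _),
          PySem.List.pyGet?_of_nonneg _ (Int.natCast_nonneg _)]
        rfl
      have ihx : ∀ v, pvBacktrack ((g00::g01::g02::t0)::(g10::g11::g12::t1)::(g20::g21::g22::t2)::gt) (4 + 1) v (1) (1 + 1) = pvSearch [g12, g20, g21, g22] v := by
        intro v
        have h2 := ih 1 2 (by norm_num) (by norm_num) v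
        rwa [show List.drop (1 * 3 + 2) [g00, g01, g02, g10, g11, g12, g20, g21, g22] = [g12, g20, g21, g22] from rfl] at h2
      rw [show List.drop (1 * 3 + 1) [g00, g01, g02, g10, g11, g12, g20, g21, g22] = [g11, g12, g20, g21, g22] from rfl]
      rw [pvBacktrack.eq_2]
      simp only [show ((1:Nat) = 3) = False by simp, if_false, show ((1:Nat) < 2) = True by simp, if_true]
      rw [hcell, pvSearch.eq_2]
      simp only [ihx]
    · -- position (1,2)
      have hj : j = 3 := by omega
      subst hj
      have hcell : pvCellA ((g00::g01::g02::t0)::(g10::g11::g12::t1)::(g20::g21::g22::t2)::gt) 1 2 = g12 := by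
        unfold pvCellA
        rw [PySem.List.pyGet?_of_nonneg _ (Int.natCast_nonneg _),
          PySem.List.pyGet?_of_nonneg _ (Int.natCast_nonneg _)]
        rfl
      have ihx : ∀ v, pvBacktrack ((g00::g01::g02::t0)::(g10::g11::g12::t1)::(g20::g21::g22::t2)::gt) (3 + 1) v (1 + 1) (0) = pvSearch [g20, g21, g22] v := by
        intro v
        have h2 := ih 2 0 (by norm_num) (by norm_num) v
        rwa [show List.drop (2 * 3 + 0) [g00, g01, g02, g10, g11, g12, g20, g21, g22] = [g20, g21, g22] from rfl] at h2
      rw [show List.drop (1 * 3 + 2) [g00, g01, g02, g10, g11, g12, g20, g21, g22] = [g12, g20, g21, g22] from rfl]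
      rw [pvBacktrack.eq_2]
      simp only [show ((1:Nat) = 3) = False by simp, if_false, show ((2:Nat) < 2) = False by simp, if_false]
      rw [hcell, pvSearch.eq_2]
      simp only [ihx]
    · -- position (2,0)
      have hj : j = 2 := by omega
      subst hj
      have hcell : pvCellA ((g00::g01::g02::t0)::(g10::g11::g12::t1)::(g20::g21::g22::t2)::gt) 2 0 = g20 := by
        unfold pvCellA
        rw [PySem.List.pyGet?_of_nonneg _ (Int.natCast_nonneg _),
          PySem.List.pyGet?_of_nonneg _ (Int.natCast_nonneg _)]
        rfl
      have ihx : ∀ v, pvBacktrack ((g00::g01::g02::t0)::(g10::g11::g12::t1)::(g20::g21::g22::t2)::gt) (2 + 1) v (2) (0 + 1) = pvSearch [g21, g22] v := by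
        intro v
        have h2 := ih 2 1 (by norm_num) (by norm_num) v
        rwa [show List.drop (2 * 3 + 1) [g00, g01, g02, g10, g11, g12, g20, g21, g22] = [g21, g22] from rfl] at h2
      rw [show List.drop (2 * 3 + 0) [g00, g01, g02, g10, g11, g12, g20, g21, g22] = [g20, g21, g22] from rfl]
      rw [pvBacktrack.eq_2]
      simp only [show ((2:Nat) = 3) = False by simp, if_false, show ((0:Nat) < 2) = True by simp, if_true]
      rw [hcell, pvSearch.eq_2]
      simp only [ihx]
    · -- position (2,1)
      have hj : j = 1 := by omega
      subst hj
      have hcell : pvCellA ((g00::g01::g02::t0)::(g10::g11::g12::t1)::(g20::g21::g22::t2)::gt) 2 1 = g21 := by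
        unfold pvCellA
        rw [PySem.List.pyGet?_of_nonneg _ (Int.natCast_nonneg _),
          PySem.List.pyGet?_of_nonneg _ (Int.natCast_nonneg _)]
        rfl
      have ihx : ∀ v, pvBacktrack ((g00::g01::g02::t0)::(g10::g11::g12::t1)::(g20::g21::g22::t2)::gt) (1 + 1) v (2) (1 + 1) = pvSearch [g22] v := by
        intro v
        have h2 := ih 2 2 (by norm_num) (by norm_num) v
        rwa [show List.drop (2 * 3 + 2) [g00, g01, g02, g10, g11, g12, g20, g21, g22] = [g22] from rfl] at h2
      rw [show List.drop (2 * 3 + 1) [g00, g01, g02, g10, g11, g12, g20, g21, g22] = [g21, g22] from rfl]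
      rw [pvBacktrack.eq_2]
      simp only [show ((2:Nat) = 3) = False by simp, if_false, show ((1:Nat) < 2) = True by simp, if_true]
      rw [hcell, pvSearch.eq_2]
      simp only [ihx]
    · -- position (2,2)
      have hj : j = 0 := by omega
      subst hj
      have hcell : pvCellA ((g00::g01::g02::t0)::(g10::g11::g12::t1)::(g20::g21::g22::t2)::gt) 2 2 = g22 := by
        unfold pvCellA
        rw [PySem.List.pyGet?_of_nonneg _ (Int.natCast_nonneg _),
          PySem.List.pyGet?_of_nonneg _ (Int.natCast_nonneg _)]
        rfl
      have ihx : ∀ v, pvBacktrack ((g00::g01::g02::t0)::(g10::g11::g12::t1)::(g20::g21::g22::t2)::gt) (0 + 1) v (2 + 1) (0) = pvSearch [] v := by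
        intro v
        have h2 := ih 3 0 (by norm_num) (by norm_num) v
        rwa [show List.drop (3 * 3 + 0) [g00, g01, g02, g10, g11, g12, g20, g21, g22] = [] from rfl] at h2
      rw [show List.drop (2 * 3 + 2) [g00, g01, g02, g10, g11, g12, g20, g21, g22] = [g22] from rfl]
      rw [pvBacktrack.eq_2]
      simp only [show ((2:Nat) = 3) = False by simp, if_false, show ((2:Nat) < 2) = False by simp, if_false]
      rw [hcell, pvSearch.eq_2]
      simp only [ihx]

theorem pvCellsB_explicit (g00 g01 g02 g10 g11 g12 g20 g21 g22 : List Int)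
    (t0 t1 t2 : List (List Int)) (gt : List (List (List Int))) :
    pvCellsB ((g00::g01::g02::t0)::(g10::g11::g12::t1)::(g20::g21::g22::t2)::gt) = [g00, g01, g02, g10, g11, g12, g20, g21, g22] := by
  unfold pvCellsB
  rw [show PySem.List.pyRange 0 3 1 = [0, 1, 2] from by decide]
  simp only [List.flatMap_cons, List.flatMap_nil, List.map_cons, List.map_nil, List.append_nil]
  norm_num [PySem.List.pyGet?_zero_cons, show ((1:Int)) = ((1:Nat):Int) from rfl,
    show ((2:Int)) = ((2:Nat):Int) from rfl, PySem.List.pyGet?_of_nonneg,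
    show Int.toNat 2 = 2 from rfl]

-- ===== VERDICT (by name: the statement is the Claim_ definition above) =====
theorem grid_is_completable_py_spec : Claim_equal_grid_is_completable_py := by
  intro grid _ hpre
  unfold Spec_grid_is_completable_py
  obtain ⟨hlen, hrows⟩ := hpre
  rcases grid with _ | ⟨r0, grid⟩; · simp at hlen
  rcases grid with _ | ⟨r1, grid⟩; · simp at hlen
  rcases grid with _ | ⟨r2, gt⟩; · simp at hlen
  have h0 := hrows r0 (by simp)
  have h1 := hrows r1 (by simp)
  have h2 := hrows r2 (by simp)
  rcases r0 with _ | ⟨g00, r0⟩; · simp at h0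
  rcases r0 with _ | ⟨g01, r0⟩; · simp at h0
  rcases r0 with _ | ⟨g02, t0⟩; · simp at h0
  rcases r1 with _ | ⟨g10, r1⟩; · simp at h1
  rcases r1 with _ | ⟨g11, r1⟩; · simp at h1
  rcases r1 with _ | ⟨g12, t1⟩; · simp at h1
  rcases r2 with _ | ⟨g20, r2⟩; · simp at h2
  rcases r2 with _ | ⟨g21, r2⟩; · simp at h2
  rcases r2 with _ | ⟨g22, t2⟩; · simp at h2
  unfold grid_is_completable_py grid_is_completable_py_alt
  have hb := pvBacktrack_bridge g00 g01 g02 g10 g11 g12 g20 g21 g22 t0 t1 t2 gt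
    9 0 0 (by norm_num) (by norm_num) PySem.Set.empty
  rw [show List.drop (0 * 3 + 0) [g00, g01, g02, g10, g11, g12, g20, g21, g22] = [g00, g01, g02, g10, g11, g12, g20, g21, g22] from rfl] at hb
  rw [show (10 : Nat) = 9 + 1 from rfl, hb, pvCellsB_explicit]
  exact search_eq_hall [g00, g01, g02, g10, g11, g12, g20, g21, g22]
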